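-- pv_equiv track=rewrite | github.com/catherineli4/experiments | tulu_partition/tulu_split_perplexity/tulu_perplexity_split.py | is_valid_chat_format
-- ===== SOURCE A (Python) =====
-- def is_valid_chat_format(messages):
--     """
--     Returns True if sample['messages'] follows:
--       [optional 'system'] -> user -> assistant -> user -> assistant -> ...
--     """
--
--     roles = [m.get("role") for m in messages]
--
--     # Drop if any role missing
--     if any(r not in ("system", "user", "assistant") for r in roles):
--         return False
--
--     # First non-system role must be 'user'
--     first_non_system = next((r for r in roles if r != "system"), None)
--     if first_non_system != "user":
--         return False
--
--     # Check alternation after optional system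
--     filtered_roles = [r for r in roles if r != "system"]
--     for i in range(1, len(filtered_roles)):
--         if filtered_roles[i] == filtered_roles[i-1]:
--             return False
--
--     return True
-- ===== SOURCE B (Python) =====
-- def is_valid_chat_format(messages):
--     prev = None
--     for m in messages:
--         role = m.get("role")
--         if role not in ("system", "user", "assistant"):
--             return False
--         if role == "system":
--             continue
--         if prev is None:
--             if role != "user":
--                 return False
--         elif role == prev:
--             return False
--         prev = role
--     return prev is not None
-- ===== Notes on version B (the rewrite author's own statement) =====
-- stated objective: simpler
-- what changed: Replaced A's four separate passes (build roles list, validity scan, find first non-system, filter + indexed adjacency loop) with one single pass over messages carrying the previous non-system role as state.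
import Mathlib
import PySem

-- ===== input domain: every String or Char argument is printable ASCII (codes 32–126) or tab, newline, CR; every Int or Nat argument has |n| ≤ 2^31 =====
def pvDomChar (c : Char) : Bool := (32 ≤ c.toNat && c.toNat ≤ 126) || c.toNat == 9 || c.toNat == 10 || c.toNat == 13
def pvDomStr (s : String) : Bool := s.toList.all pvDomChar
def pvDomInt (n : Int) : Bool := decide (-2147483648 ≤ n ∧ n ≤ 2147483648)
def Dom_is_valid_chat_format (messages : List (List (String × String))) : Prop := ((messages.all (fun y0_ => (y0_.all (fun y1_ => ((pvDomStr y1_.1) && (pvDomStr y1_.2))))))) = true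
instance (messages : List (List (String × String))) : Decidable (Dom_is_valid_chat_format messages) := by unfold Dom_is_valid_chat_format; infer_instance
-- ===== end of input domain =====

-- B replaces A's four passes (roles list, validity scan, first-non-system search, filter + indexed
-- adjacency loop) with one pass carrying the previous non-system role as state (objective: simpler).

-- ===== PORT A =====
-- m.get("role"): dict as association list, first match
def pvGetRole (m : List (String × String)) : Option String := List.lookup "role" m

-- 'for i in range(1, len(filtered)): if filtered[i] == filtered[i-1]: return False'
def pvChkAdj : List (Option String) → Bool
  | [] => true
  | [_] => true
  | a :: b :: t => if b == a then false else pvChkAdj (b :: t)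

def is_valid_chat_format (messages : List (List (String × String))) : Bool :=
  let roles := messages.map pvGetRole
  if roles.any (fun r => !(r == some "system" || r == some "user" || r == some "assistant")) then
    false
  else
    let first_non_system := roles.find? (fun r => r != some "system")
    if first_non_system != some (some "user") then false
    else
      let filtered := roles.filter (fun r => r != some "system")
      pvChkAdj filtered

-- ===== PORT B =====
-- single pass; prev = last non-system role seen (none if none yet)
def pvAltLoop (prev : Option String) : List (List (String × String)) → Bool
  | [] => prev.isSome
  | m :: rest =>
    let role := pvGetRole m
    if !(role == some "system" || role == some "user" || role == some "assistant") then false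
    else if role == some "system" then pvAltLoop prev rest
    else
      match prev with
      | none => if role != some "user" then false else pvAltLoop role rest
      | some p => if role == some p then false else pvAltLoop role rest

def is_valid_chat_format_alt (messages : List (List (String × String))) : Bool :=
  pvAltLoop none messages

-- ===== PRECONDITION & SPEC =====
def Spec_is_valid_chat_format (messages : List (List (String × String))) (out : Bool) : Prop := out = is_valid_chat_format_alt messages
instance (messages : List (List (String × String))) (out : Bool) : Decidable (Spec_is_valid_chat_format messages out) := by unfold Spec_is_valid_chat_format; infer_instance

-- ===== CLAIM (what is proved, stated in full; the proofs are below) =====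
def Claim_equal_is_valid_chat_format : Prop := ∀ (messages : List (List (String × String))), Dom_is_valid_chat_format messages → Spec_is_valid_chat_format messages (is_valid_chat_format messages)

-- ===== LEMMAS AND PROOFS =====

def pvValid (r : Option String) : Bool := r == some "system" || r == some "user" || r == some "assistant"

-- B's loop, re-expressed over the roles list (proof-only)
def pvLoopR (prev : Option String) : List (Option String) → Bool
  | [] => prev.isSome
  | r :: rest =>
    if !(pvValid r) then false
    else if r == some "system" then pvLoopR prev rest
    else
      match prev with
      | none => if r != some "user" then false else pvLoopR r rest
      | some p => if r == some p then false else pvLoopR r rest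

theorem pvAltLoop_eq_loopR (prev : Option String) (ms : List (List (String × String))) :
    pvAltLoop prev ms = pvLoopR prev (ms.map pvGetRole) := by
  induction ms generalizing prev with
  | nil => rfl
  | cons m t ih =>
    cases prev <;>
      dsimp only [pvAltLoop, pvLoopR, List.map_cons, pvValid] <;>
      split_ifs <;> first | rfl | exact ih _

theorem pvLoopR_invalid (prev : Option String) (rs : List (Option String))
    (h : rs.any (fun r => !(pvValid r)) = true) : pvLoopR prev rs = false := by
  induction rs generalizing prev with
  | nil => simp at h
  | cons r t ih =>
    simp only [List.any_cons, Bool.or_eq_true] at h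
    cases prev <;> dsimp only [pvLoopR] <;> split_ifs <;>
      first
        | rfl
        | (rcases h with h | h
           · simp_all
           · exact ih _ h)

theorem pvLoopR_some (p : String) (rs : List (Option String))
    (h : rs.all pvValid = true) :
    pvLoopR (some p) rs = pvChkAdj (some p :: rs.filter (fun r => r != some "system")) := by
  induction rs generalizing p with
  | nil => rfl
  | cons r t ih =>
    simp only [List.all_cons, Bool.and_eq_true] at h
    obtain ⟨hr, ht⟩ := h
    simp only [pvLoopR, hr, Bool.not_true, Bool.false_eq_true, if_false, List.filter_cons]
    by_cases hs : r = some "system"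
    · simp [hs, ih _ ht]
    · have hr' : ∃ u, r = some u := by
        cases r with
        | none => simp [pvValid] at hr
        | some u => exact ⟨u, rfl⟩
      obtain ⟨u, rfl⟩ := hr'
      have hps : ¬ u = "system" := fun hh => hs (by rw [hh])
      by_cases he : u = p
      · subst he
        simp [hps, pvChkAdj]
      · have hup : (some u == some p) = false := by simp [he]
        simp [hps, hup, pvChkAdj, ih _ ht]

theorem pvLoopR_none (rs : List (Option String)) (h : rs.all pvValid = true) :
    pvLoopR none rs =
      (match rs.filter (fun r => r != some "system") with
        | [] => false
        | u :: t => u == some "user" && pvChkAdj (u :: t)) := by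
  induction rs with
  | nil => rfl
  | cons r t ih =>
    simp only [List.all_cons, Bool.and_eq_true] at h
    obtain ⟨hr, ht⟩ := h
    simp only [pvLoopR, hr, Bool.not_true, Bool.false_eq_true, if_false, List.filter_cons]
    by_cases hs : r = some "system"
    · simp [hs, ih ht]
    · have hr' : ∃ u, r = some u := by
        cases r with
        | none => simp [pvValid] at hr
        | some u => exact ⟨u, rfl⟩
      obtain ⟨u, rfl⟩ := hr'
      have hps : ¬ u = "system" := fun hh => hs (by rw [hh])
      by_cases he : u = "user"
      · simp [he, pvLoopR_some _ _ ht]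
      · have h1 : (some u == some "user") = false := by simp [he]
        simp [hps, h1, he]

theorem pvFind?_eq_head?_filter (p : Option String → Bool) (rs : List (Option String)) :
    rs.find? p = (rs.filter p).head? := by
  induction rs with
  | nil => rfl
  | cons r t ih =>
    by_cases h : p r = true
    · simp [h]
    · rw [List.find?_cons_of_neg h, List.filter_cons_of_neg h]
      exact ih

theorem pvMain (rs : List (Option String)) :
    pvLoopR none rs =
      (if rs.any (fun r => !(pvValid r)) then false
       else if rs.find? (fun r => r != some "system") != some (some "user") then false
       else pvChkAdj (rs.filter (fun r => r != some "system"))) := by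
  by_cases hinv : rs.any (fun r => !(pvValid r)) = true
  · simp [hinv, pvLoopR_invalid]
  · have hall : rs.all pvValid = true := by
      simp only [List.all_eq_true]
      intro r hr
      by_contra hc
      simp only [Bool.not_eq_true] at hc
      exact hinv (List.any_eq_true.mpr ⟨r, hr, by simp [hc]⟩)
    rw [pvLoopR_none rs hall, pvFind?_eq_head?_filter]
    simp only [hinv]
    cases hf : rs.filter (fun r => r != some "system") with
    | nil => simp
    | cons u t =>
      by_cases hu : u = some "user"
      · simp [hu]
      · have : (u == some "user") = false := by simp [hu]
        simp [this, hu]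

-- ===== VERDICT (by name: the statement is the Claim_ definition above) =====
theorem is_valid_chat_format_spec : Claim_equal_is_valid_chat_format := by
  intro messages _
  unfold Spec_is_valid_chat_format is_valid_chat_format is_valid_chat_format_alt
  rw [pvAltLoop_eq_loopR, pvMain]
  simp [pvValid]
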